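-- pv_equiv track=rewrite | github.com/liugang926/HOOK_GZEAMS | backend/apps/system/viewsets/object_router.py | _pick_locale_text
-- ===== SOURCE A (Python) =====
-- from typing import Any, Dict, List, Optional
--
-- def _pick_locale_text(localized_map: Any, locale: str) -> str:
--     """Pick a localized text from a locale map."""
--     if not isinstance(localized_map, dict):
--         return ''
--     if locale in localized_map and localized_map.get(locale):
--         return str(localized_map.get(locale))
--     short_locale = locale.split('-', 1)[0]
--     if short_locale in localized_map and localized_map.get(short_locale):
--         return str(localized_map.get(short_locale))
--     if 'zh-CN' in localized_map and localized_map.get('zh-CN'):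
--         return str(localized_map.get('zh-CN'))
--     if 'en-US' in localized_map and localized_map.get('en-US'):
--         return str(localized_map.get('en-US'))
--     for _, value in localized_map.items():
--         if value:
--             return str(value)
--     return ''
-- ===== SOURCE B (Python) =====
-- def _pick_locale_text(localized_map, locale):
--     """Pick a localized text from a locale map (single pass, priority table)."""
--     if not isinstance(localized_map, dict):
--         return ''
--     short = locale.split('-', 1)[0]
--     prio = {'en-US': 3, 'zh-CN': 2, short: 1, locale: 0}
--     best_p, best_v = 5, ''
--     for k, v in localized_map.items():
--         if v:
--             p = prio.get(k, 4)
--             if p < best_p: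
--                 best_p, best_v = p, str(v)
--     return best_v
-- ===== Notes on version B (the rewrite author's own statement) =====
-- stated objective: alternative
-- what changed: Replaces A's sequence of four candidate dict lookups followed by a separate fallback scan with a single pass over the map that keeps the truthy entry of minimal priority (priority table: locale=0, short locale=1, zh-CN=2, en-US=3, anything else=4).
import Mathlib
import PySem

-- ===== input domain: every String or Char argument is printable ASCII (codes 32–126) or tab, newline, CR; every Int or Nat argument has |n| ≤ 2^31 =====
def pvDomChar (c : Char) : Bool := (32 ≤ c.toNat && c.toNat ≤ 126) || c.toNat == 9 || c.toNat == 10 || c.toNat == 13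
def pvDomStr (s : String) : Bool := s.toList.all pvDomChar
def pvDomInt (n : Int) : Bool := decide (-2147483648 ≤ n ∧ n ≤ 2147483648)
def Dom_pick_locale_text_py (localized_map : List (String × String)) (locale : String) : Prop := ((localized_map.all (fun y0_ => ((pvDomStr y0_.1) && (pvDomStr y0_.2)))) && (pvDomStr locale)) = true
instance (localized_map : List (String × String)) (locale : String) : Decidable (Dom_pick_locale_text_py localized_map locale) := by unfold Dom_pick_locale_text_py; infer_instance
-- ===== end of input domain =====

-- B replaces A's chain of four dict lookups plus a fallback scan by ONE pass over the map
-- selecting the truthy entry of minimal priority (objective: alternative single-pass algorithm).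

-- ===== PORT A =====
-- `locale in d and d.get(locale)` on a str-valued dict: contains ∧ lookup truthy; str(v) = v.
def pick_locale_text_py (localized_map : List (String × String)) (locale : String) : String :=
  let d := PySem.Dict.mk localized_map
  if d.contains locale ∧ (d.get? locale).getD "" ≠ "" then (d.get? locale).getD ""
  else
    let short_locale : String :=
      match PySem.Str.splitMax? locale "-" 1 with
      | some ps => ps.headD ""          -- locale.split('-', 1)[0]; sep ≠ "" so split is `some` and nonempty
      | none => ""
    if d.contains short_locale ∧ (d.get? short_locale).getD "" ≠ "" then (d.get? short_locale).getD ""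
    else if d.contains "zh-CN" ∧ (d.get? "zh-CN").getD "" ≠ "" then (d.get? "zh-CN").getD ""
    else if d.contains "en-US" ∧ (d.get? "en-US").getD "" ≠ "" then (d.get? "en-US").getD ""
    else
      match d.items.find? (fun kv => kv.2 ≠ "") with  -- for _, value in items(): if value: return str(value)
      | some kv => kv.2
      | none => ""

-- ===== PORT B =====
def pick_locale_text_py_alt (localized_map : List (String × String)) (locale : String) : String :=
  let short : String :=
    match PySem.Str.splitMax? locale "-" 1 with
    | some ps => ps.headD ""
    | none => ""
  let prio : PySem.Dict String Int :=
    (((PySem.Dict.empty.insert "en-US" 3).insert "zh-CN" 2).insert short 1).insert locale 0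
  let best := localized_map.foldl
    (fun best kv =>
      if kv.2 ≠ "" then
        let p := prio.getD kv.1 4
        if p < best.1 then (p, kv.2) else best
      else best)
    ((5 : Int), "")
  best.2

-- ===== PRECONDITION & SPEC =====
-- Pre_ restricts the dict argument to association lists with pairwise-distinct keys: a Python dict
-- cannot contain a duplicate key, so lists with duplicates do not correspond to any actual input of A.
def Pre_pick_locale_text_py (localized_map : List (String × String)) (locale : String) : Prop :=
  (localized_map.map Prod.fst).Nodup
instance (localized_map : List (String × String)) (locale : String) : Decidable (Pre_pick_locale_text_py localized_map locale) := by unfold Pre_pick_locale_text_py; infer_instance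
def pvWitness_pick_locale_text_py : (List (String × String)) × String :=
  ([("en-US", "hello"), ("zh", "ni hao")], "zh-CN")

def Spec_pick_locale_text_py (localized_map : List (String × String)) (locale : String) (out : String) : Prop := out = pick_locale_text_py_alt localized_map locale
instance (localized_map : List (String × String)) (locale : String) (out : String) : Decidable (Spec_pick_locale_text_py localized_map locale out) := by unfold Spec_pick_locale_text_py; infer_instance

-- ===== CLAIM (what is proved, stated in full; the proofs are below) =====
def Claim_equal_pick_locale_text_py : Prop := ∀ (localized_map : List (String × String)) (locale : String), Dom_pick_locale_text_py localized_map locale → Pre_pick_locale_text_py localized_map locale → Spec_pick_locale_text_py localized_map locale (pick_locale_text_py localized_map locale)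

-- ===== LEMMAS AND PROOFS =====

-- the priority function the literal dict in B computes
def prF (locale short k : String) : Int :=
  if k = locale then 0 else if k = short then 1 else if k = "zh-CN" then 2 else if k = "en-US" then 3 else 4

lemma prio_getD_eq (locale short k : String) :
    ((((PySem.Dict.empty.insert "en-US" 3).insert "zh-CN" 2).insert short 1).insert locale 0).getD k 4
      = prF locale short k := by
  simp only [PySem.Dict.getD_insert, PySem.Dict.getD_empty, prF]

lemma prF_le_four (locale short k : String) : prF locale short k ≤ 4 := by
  unfold prF; split_ifs <;> omega

-- right-recursive form of B's fold
def bestR (pr : String → Int) : List (String × String) → Int × String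
  | [] => (5, "")
  | kv :: t =>
    let b := bestR pr t
    if kv.2 ≠ "" then (if pr kv.1 ≤ b.1 then (pr kv.1, kv.2) else b) else b

def fStep (pr : String → Int) (best : Int × String) (kv : String × String) : Int × String :=
  if kv.2 ≠ "" then (if pr kv.1 < best.1 then (pr kv.1, kv.2) else best) else best

lemma bestR_fst_le (pr : String → Int) (hpr : ∀ k, pr k ≤ 4) (m : List (String × String)) :
    (bestR pr m).1 ≤ 5 := by
  induction m with
  | nil => simp [bestR]
  | cons kv t ih =>
    simp only [bestR]
    split_ifs with h1 h2
    · exact le_trans (hpr kv.1) (by omega)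
    · exact ih
    · exact ih

lemma foldl_eq_bestR (pr : String → Int) (hpr : ∀ k, pr k ≤ 4) (m : List (String × String)) :
    ∀ acc : Int × String, acc.1 ≤ 5 →
      m.foldl (fStep pr) acc = if (bestR pr m).1 < acc.1 then bestR pr m else acc := by
  induction m with
  | nil =>
    intro acc hacc
    simp only [List.foldl_nil, bestR]
    rw [if_neg (by omega)]
  | cons kv t ih =>
    intro acc hacc
    have hstep : (fStep pr acc kv).1 ≤ 5 := by
      unfold fStep; split_ifs
      · exact le_trans (hpr kv.1) (by omega)
      · exact hacc
      · exact hacc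
    rw [List.foldl_cons, ih (fStep pr acc kv) hstep]
    simp only [bestR, fStep]
    split_ifs <;> first | rfl | omega

lemma bestR_snd_of_top (pr : String → Int) (hpr : ∀ k, pr k ≤ 4) (m : List (String × String))
    (h : (bestR pr m).1 = 5) : (bestR pr m).2 = "" := by
  induction m with
  | nil => simp [bestR]
  | cons kv t ih =>
    simp only [bestR] at h ⊢
    split_ifs at h ⊢ with h1 h2
    · exfalso; have := hpr kv.1; simp at h; omega
    · exact ih h
    · exact ih h

-- B's port computes (bestR (prF locale short) m).2
lemma alt_eq_bestR (localized_map : List (String × String)) (locale : String) :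
    pick_locale_text_py_alt localized_map locale =
      (bestR (prF locale
        (match PySem.Str.splitMax? locale "-" 1 with
         | some ps => ps.headD "" | none => "")) localized_map).2 := by
  set short := (match PySem.Str.splitMax? locale "-" 1 with
         | some ps => ps.headD "" | none => "") with hshort
  have hpr : ∀ k, prF locale short k ≤ 4 := prF_le_four locale short
  have hbody : pick_locale_text_py_alt localized_map locale
      = (localized_map.foldl (fStep (prF locale short)) ((5 : Int), "")).2 := by
    unfold pick_locale_text_py_alt fStep
    rw [← hshort]
    have hfun : (fun (best : Int × String) (kv : String × String) =>
        if kv.2 ≠ "" then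
          (if ((((PySem.Dict.empty.insert "en-US" 3).insert "zh-CN" 2).insert short 1).insert locale 0).getD kv.1 4 < best.1
           then (((((PySem.Dict.empty.insert "en-US" 3).insert "zh-CN" 2).insert short 1).insert locale 0).getD kv.1 4, kv.2)
           else best)
        else best)
        = (fun best kv => if kv.2 ≠ "" then (if prF locale short kv.1 < best.1 then (prF locale short kv.1, kv.2) else best) else best) := by
      funext best kv
      simp only [prio_getD_eq]
    simp only [hfun]
  rw [hbody, foldl_eq_bestR (prF locale short) hpr localized_map ((5 : Int), "") (by simp)]
  split_ifs with h
  · rfl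
  · have h5 : (bestR (prF locale short) localized_map).1 = 5 := by
      have := bestR_fst_le (prF locale short) hpr localized_map; omega
    rw [bestR_snd_of_top (prF locale short) hpr localized_map h5]

-- A's chain with the priority of the chosen branch recorded
def chainP (m : List (String × String)) (locale short : String) : Int × String :=
  let d := PySem.Dict.mk m
  if (d.get? locale).getD "" ≠ "" then (0, (d.get? locale).getD "")
  else if (d.get? short).getD "" ≠ "" then (1, (d.get? short).getD "")
  else if (d.get? "zh-CN").getD "" ≠ "" then (2, (d.get? "zh-CN").getD "")
  else if (d.get? "en-US").getD "" ≠ "" then (3, (d.get? "en-US").getD "")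
  else
    match m.find? (fun kv => kv.2 ≠ "") with
    | some kv => (4, kv.2)
    | none => (5, "")

lemma A_eq_chainP (localized_map : List (String × String)) (locale : String) :
    pick_locale_text_py localized_map locale =
      (chainP localized_map locale
        (match PySem.Str.splitMax? locale "-" 1 with
         | some ps => ps.headD "" | none => "")).2 := by
  unfold pick_locale_text_py chainP
  set d := PySem.Dict.mk localized_map
  have hcond : ∀ k : String, (d.contains k ∧ (d.get? k).getD "" ≠ "") ↔ ((d.get? k).getD "" ≠ "") := by
    intro k
    constructor
    · exact fun h => h.2
    · intro h
      refine ⟨?_, h⟩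
      rw [PySem.Dict.contains_eq_isSome_get?]
      cases hg : d.get? k with
      | none => rw [hg] at h; simp at h
      | some v => simp
  simp only [hcond]
  split_ifs <;> first
    | rfl
    | (cases hf : localized_map.find? (fun kv => kv.2 ≠ "") <;> simp)

-- one truthy fresh-keyed entry in front of the chain = min-combining it into the chain
set_option maxHeartbeats 3200000 in
lemma step_chainP (locale short k v : String) (t : List (String × String))
    (hv : v ≠ "") (hk : (PySem.Dict.mk t).get? k = none) :
    chainP ((k, v) :: t) locale short =
      (if prF locale short k ≤ (chainP t locale short).1
       then (prF locale short k, v) else chainP t locale short) := by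
  unfold chainP prF
  simp only [PySem.Dict.get?_mk_cons, List.find?_cons]
  by_cases h0 : k = locale <;> by_cases h1 : k = short <;>
    by_cases h2 : k = "zh-CN" <;> by_cases h3 : k = "en-US" <;>
    (try subst h0) <;> (try subst h1) <;> (try subst h2) <;> (try subst h3) <;>
    cases hf : t.find? (fun kv => kv.2 ≠ "") <;>
    simp_all <;> split_ifs <;> simp_all

-- a falsy head entry leaves the chain unchanged
lemma step_chainP_falsy (locale short k : String) (t : List (String × String))
    (hk : (PySem.Dict.mk t).get? k = none) :
    chainP ((k, "") :: t) locale short = chainP t locale short := by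
  unfold chainP
  simp only [PySem.Dict.get?_mk_cons, List.find?_cons]
  have hg : ∀ c : String, (if k == c then some "" else (PySem.Dict.mk t).get? c).getD ""
      = ((PySem.Dict.mk t).get? c).getD "" := by
    intro c
    by_cases he : k = c
    · subst he; simp [hk]
    · simp [he]
  simp only [hg]
  rfl

-- main: on a nodup-keyed map the single-pass minimum equals A's chain
lemma bestR_eq_chainP (locale short : String) (m : List (String × String))
    (hn : (m.map Prod.fst).Nodup) :
    bestR (prF locale short) m = chainP m locale short := by
  induction m with
  | nil =>
    have hnil : ∀ c : String, (PySem.Dict.mk ([] : List (String × String))).get? c = none := fun _ => rfl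
    simp [bestR, chainP, hnil]
  | cons x t ih =>
    obtain ⟨k, v⟩ := x
    simp only [List.map_cons, List.nodup_cons, List.mem_map] at hn
    have hk : (PySem.Dict.mk t).get? k = none := by
      rw [PySem.Dict.get?_eq_none_iff_not_mem_keys]
      simpa [PySem.Dict.keys_mk] using hn.1
    have iht := ih hn.2
    by_cases hv : v = ""
    · subst hv
      rw [step_chainP_falsy locale short k t hk]
      simp only [bestR, iht]
      simp
    · rw [step_chainP locale short k v t hv hk]
      simp only [bestR, iht]
      simp [hv]

-- ===== VERDICT (by name: the statement is the Claim_ definition above) =====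
theorem pick_locale_text_py_spec : Claim_equal_pick_locale_text_py := by
  intro localized_map locale _hdom hpre
  unfold Spec_pick_locale_text_py
  rw [A_eq_chainP, alt_eq_bestR,
    bestR_eq_chainP locale _ localized_map hpre]
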